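-- pv_equiv track=rewrite | github.com/masoud-maghsoudi/quera-org | hex-numbers.py | hex_numbers
-- ===== SOURCE A (Python) =====
-- def hex_numbers(n):
--     numbers = list(map(int,str(n)))
--     new_numbers = []
--     for number in numbers:
--         if number > 1:
--             new_numbers.append(str(1))
--         else:
--             new_numbers.append(str(number))
--     return(int("".join(new_numbers), base=2))
-- ===== SOURCE B (Python) =====
-- def hex_numbers(n):
--     result = 0
--     for ch in str(n):
--         d = int(ch)
--         result = result * 2 + (1 if d > 1 else d)
--     return result
-- ===== Notes on version B (the rewrite author's own statement) =====
-- stated objective: simpler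
-- what changed: Replaces building a list of clamped digit strings and parsing it with int(..., base=2) by a direct Horner fold: one pass over str(n) accumulating result = result*2 + clamped bit, with no intermediate list or string.
-- outside the precondition, e.g. on hex_numbers(-5): A raises ValueError, B raises ValueError
import Mathlib
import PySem

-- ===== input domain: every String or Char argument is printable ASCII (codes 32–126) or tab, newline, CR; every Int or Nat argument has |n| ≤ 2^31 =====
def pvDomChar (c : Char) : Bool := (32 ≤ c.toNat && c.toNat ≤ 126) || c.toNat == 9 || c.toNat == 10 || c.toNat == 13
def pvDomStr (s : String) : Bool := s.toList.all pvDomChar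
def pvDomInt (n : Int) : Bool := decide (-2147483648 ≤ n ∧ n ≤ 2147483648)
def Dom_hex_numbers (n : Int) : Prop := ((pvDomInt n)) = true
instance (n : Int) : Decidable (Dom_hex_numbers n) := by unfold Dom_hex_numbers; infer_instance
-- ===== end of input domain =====

-- B replaces A's build-clamped-string-then-int(...,base=2) with a single Horner fold over str(n); objective: simpler.

-- ===== PORT A =====
-- int(ch) on a single character: exact for the digit characters occurring in str(n) for n ≥ 0
def pvCharInt (c : Char) : Int := (c.toNat : Int) - 48
-- str(d) for single digit d: exact for 0 ≤ d ≤ 9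
def pvDigitChar (d : Int) : Char := Char.ofNat (d + 48).toNat
-- int(s, base=2): exact when s consists of '0'/'1' characters (as new_numbers does on Pre_)
def pvParseBin (cs : List Char) : Int := cs.foldl (fun acc c => acc * 2 + pvCharInt c) 0

def hex_numbers (n : Int) : Int :=
  let numbers := (PySem.Int.toStr n).toList.map pvCharInt
  let new_numbers := numbers.foldl
    (fun acc number => acc ++ [if number > 1 then '1' else pvDigitChar number]) ([] : List Char)
  pvParseBin new_numbers

-- ===== PORT B =====
def hex_numbers_alt (n : Int) : Int :=
  (PySem.Int.toStr n).toList.foldl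
    (fun result ch =>
      let d := pvCharInt ch
      result * 2 + (if d > 1 then 1 else d)) 0

-- ===== PRECONDITION & SPEC =====
-- Pre_ excludes n < 0, where Python's int('-') raises ValueError in A (and in B alike).
def Pre_hex_numbers (n : Int) : Prop := 0 ≤ n
instance (n : Int) : Decidable (Pre_hex_numbers n) := by unfold Pre_hex_numbers; infer_instance
def pvWitness_hex_numbers : Int := 103
def Spec_hex_numbers (n : Int) (out : Int) : Prop := out = hex_numbers_alt n
instance (n : Int) (out : Int) : Decidable (Spec_hex_numbers n out) := by unfold Spec_hex_numbers; infer_instance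

-- ===== CLAIM (what is proved, stated in full; the proofs are below) =====
def Claim_equal_hex_numbers : Prop := ∀ (n : Int), Dom_hex_numbers n → Pre_hex_numbers n → Spec_hex_numbers n (hex_numbers n)

-- ===== LEMMAS AND PROOFS =====

-- A's append loop builds exactly the mapped list
theorem pv_build_eq_map (l : List Int) (s : List Char) :
    l.foldl (fun acc number => acc ++ [if number > 1 then '1' else pvDigitChar number]) s
      = s ++ l.map (fun number => if number > 1 then '1' else pvDigitChar number) := by
  induction l generalizing s with
  | nil => simp
  | cons x xs ih => simp [List.foldl_cons, ih]

-- per-character round trip: parsing A's encoded character gives B's clamped bit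
theorem pv_digitChar_charInt (c : Char) : pvDigitChar (pvCharInt c) = c := by
  have h48 : pvCharInt c + 48 = (c.toNat : Int) := by simp [pvCharInt]
  simp only [pvDigitChar, h48, Int.toNat_natCast, Char.ofNat_toNat]

-- per-character round trip: parsing A's encoded character gives B's clamped bit
theorem pv_char_roundtrip (c : Char) :
    pvCharInt (if pvCharInt c > 1 then '1' else pvDigitChar (pvCharInt c))
      = (if pvCharInt c > 1 then 1 else pvCharInt c) := by
  by_cases h : pvCharInt c > 1
  · rw [if_pos h, if_pos h]; decide
  · rw [if_neg h, if_neg h, pv_digitChar_charInt]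

theorem pv_fold_eq (cs : List Char) (a : Int) :
    (cs.map (fun c => if pvCharInt c > 1 then '1' else pvDigitChar (pvCharInt c))).foldl
        (fun acc c => acc * 2 + pvCharInt c) a
      = cs.foldl (fun result ch => result * 2 + (if pvCharInt ch > 1 then 1 else pvCharInt ch)) a := by
  induction cs generalizing a with
  | nil => rfl
  | cons c cs ih => simp only [List.map_cons, List.foldl_cons, pv_char_roundtrip, ih]

-- ===== VERDICT (by name: the statement is the Claim_ definition above) =====
theorem hex_numbers_spec : Claim_equal_hex_numbers := by
  intro n _ _
  unfold Spec_hex_numbers hex_numbers hex_numbers_alt pvParseBin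
  simp only [pv_build_eq_map, List.nil_append, List.map_map]
  rw [show ((fun number => if number > 1 then '1' else pvDigitChar number) ∘ pvCharInt)
        = fun c => if pvCharInt c > 1 then '1' else pvDigitChar (pvCharInt c) from rfl]
  exact pv_fold_eq _ 0
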